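-- pv_equiv track=rewrite | github.com/testzer0/AmbiQT | benchmark/tbl-split/generate.py | normalize_sql
-- ===== SOURCE A (Python) =====
-- def lower(s):
--     s = s.replace("``", "`")
--     lowers = ""
--     current_quote = None
--     for c in s:
--         if current_quote is None:
--             lowers += c.lower()
--             if c in ['"', '\'', '`']:
--                 current_quote = c
--         else:
--             lowers += c
--             if c == current_quote:
--                 current_quote = None
--     return lowers
--
-- def normalize_sql(sql):
--     if sql[-1] == ';':
--         sql = sql[:-1]
--     sql = " ".join(lower(sql).strip().split())
--     sql = sql.replace(" ,", ",").replace("( ", "(").replace(" )", ")")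
--     for kword in ["count", "avg", "sum", "min", "max"]:
--         sql = sql.replace(kword+" (", kword+"(")
--     return sql.replace(") ,", "),")
-- ===== SOURCE B (Python) =====
-- def normalize_sql(sql):
--     if sql.endswith(';'):
--         sql = sql[:-1]
--     s = sql.replace("``", "`")
--     # segment-based lowercasing: jump from quote to quote instead of a
--     # per-character state machine
--     out = []
--     i = 0
--     n = len(s)
--     while i < n:
--         c = s[i]
--         if c in '"\'`':
--             j = s.find(c, i + 1)
--             if j == -1:
--                 out.append(s[i:])      # unterminated quote: tail verbatim
--                 i = n
--             else:
--                 out.append(s[i:j + 1])  # quoted span verbatim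
--                 i = j + 1
--         else:
--             j = i
--             while j < n and s[j] not in '"\'`':
--                 j += 1
--             out.append(s[i:j].lower())
--             i = j
--     sql = " ".join("".join(out).strip().split())
--     for old, new in [(" ,", ","), ("( ", "("), (" )", ")")] + \
--             [(k + " (", k + "(") for k in ("count", "avg", "sum", "min", "max")] + \
--             [(") ,", "),")]:
--         sql = sql.replace(old, new)
--     return sql
-- ===== Notes on version B (the rewrite author's own statement) =====
-- stated objective: alternative
-- what changed: The per-character quote state machine of lower() is replaced by a segment-based scan that jumps from quote to quote with str.find, copying quoted spans verbatim and lowercasing whole unquoted spans at once, and the fixed replace chain becomes one data-driven loop over (old,new) pairs.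
-- crash fix: A raises IndexError on the empty string (sql[-1]); B uses str.endswith and returns '' there. — e.g. on normalize_sql(""): A raises IndexError, B returns ""
import Mathlib
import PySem

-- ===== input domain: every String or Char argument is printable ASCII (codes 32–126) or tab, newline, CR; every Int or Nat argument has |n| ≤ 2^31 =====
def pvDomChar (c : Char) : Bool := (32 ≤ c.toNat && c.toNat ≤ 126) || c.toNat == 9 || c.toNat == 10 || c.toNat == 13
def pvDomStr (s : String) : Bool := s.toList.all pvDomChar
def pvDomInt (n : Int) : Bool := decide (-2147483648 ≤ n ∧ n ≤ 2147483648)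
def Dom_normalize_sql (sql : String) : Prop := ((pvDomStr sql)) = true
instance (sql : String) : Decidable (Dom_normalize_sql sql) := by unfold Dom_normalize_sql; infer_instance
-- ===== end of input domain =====

-- B replaces A's per-character quote state machine by a segment-based scan
-- (jump quote-to-quote) and folds the fixed replace chain over a pair list
-- (objective: alternative, same cost).

-- ===== PORT A =====
def pvLowerA (s : String) : String :=
  let s2 := PySem.Str.replace s "``" "`"
  let r := s2.toList.foldl
    (fun (st : List Char × Option Char) c =>
      match st.2 with
      | none =>
        (st.1 ++ [PySem.Chars.lowerChar c],
         if c ∈ ['"', '\'', '`'] then some c else none)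
      | some q => (st.1 ++ [c], if c = q then none else some q))
    ([], none)
  String.ofList r.1

def normalize_sql (sql : String) : String :=
  -- sql[-1] raises IndexError on "": excluded by Pre_normalize_sql
  let sql1 := if PySem.Str.pyGet? sql (-1) = some ';' then PySem.Str.slice sql none (some (-1)) else sql
  let sql2 := PySem.Str.join " " (PySem.Str.split₀ (PySem.Str.strip (pvLowerA sql1)))
  let sql3 := PySem.Str.replace (PySem.Str.replace (PySem.Str.replace sql2 " ," ",") "( " "(") " )" ")"
  let sql4 := ["count", "avg", "sum", "min", "max"].foldl
      (fun s kword => PySem.Str.replace s (kword ++ " (") (kword ++ "(")) sql3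
  PySem.Str.replace sql4 ") ," "),"

-- ===== PORT B =====
def pvIsQuote (c : Char) : Bool := c == '"' || c == '\'' || c == '`'

-- Source B's while loop over spans: a quoted span is copied verbatim up to the
-- matching quote found by str.find (verbatim tail if unterminated), an
-- unquoted span is lowercased whole.
def pvSegLower : List Char → List Char
  | [] => []
  | c :: cs =>
    if pvIsQuote c then
      if _hr : cs.dropWhile (fun x => x != c) = [] then
        c :: cs.takeWhile (fun x => x != c)
      else
        (c :: cs.takeWhile (fun x => x != c)) ++
          c :: pvSegLower ((cs.dropWhile (fun x => x != c)).tail)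
    else
      PySem.Chars.lowerChar c ::
        ((cs.takeWhile (fun x => !pvIsQuote x)).map PySem.Chars.lowerChar ++
          pvSegLower (cs.dropWhile (fun x => !pvIsQuote x)))
termination_by l => l.length
decreasing_by
  · have h2 := List.length_dropWhile_le (fun x => x != c) cs
    have h3 : 0 < (cs.dropWhile (fun x => x != c)).length := List.length_pos_of_ne_nil _hr
    simp [List.length_tail]
    omega
  · have h2 := List.length_dropWhile_le (fun x => !pvIsQuote x) cs
    simp
    omega

def normalize_sql_alt (sql : String) : String :=
  let sql1 := if PySem.Str.endswith sql ";" then PySem.Str.slice sql none (some (-1)) else sql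
  let sql2 := String.ofList (pvSegLower (PySem.Str.replace sql1 "``" "`").toList)
  let sql3 := PySem.Str.join " " (PySem.Str.split₀ (PySem.Str.strip sql2))
  let pairs := [(" ,", ","), ("( ", "("), (" )", ")")] ++
      (["count", "avg", "sum", "min", "max"].map (fun k => (k ++ " (", k ++ "("))) ++
      [(") ,", "),")]
  pairs.foldl (fun s p => PySem.Str.replace s p.1 p.2) sql3

-- ===== PRECONDITION & SPEC =====
-- Pre_ excludes only the empty string, on which A's sql[-1] raises IndexError.
def Pre_normalize_sql (sql : String) : Prop := sql ≠ ""
instance (sql : String) : Decidable (Pre_normalize_sql sql) := by unfold Pre_normalize_sql; infer_instance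
def pvWitness_normalize_sql : String := "SELECT A FROM t;"

-- A raises IndexError on the empty string (sql[-1]); B uses str.endswith and returns '' there.
def Raises_normalize_sql (sql : String) : Prop := sql = ""
instance (sql : String) : Decidable (Raises_normalize_sql sql) := by unfold Raises_normalize_sql; infer_instance
def pvRaiseWitness_normalize_sql : String := ""
def pvRaiseWitnessOut_normalize_sql : String := ""

def Spec_normalize_sql (sql : String) (out : String) : Prop := out = normalize_sql_alt sql
instance (sql : String) (out : String) : Decidable (Spec_normalize_sql sql out) := by unfold Spec_normalize_sql; infer_instance

-- ===== CLAIM (what is proved, stated in full; the proofs are below) =====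
def Claim_equal_normalize_sql : Prop := ∀ (sql : String), Dom_normalize_sql sql → Pre_normalize_sql sql → Spec_normalize_sql sql (normalize_sql sql)
def Claim_raises_normalize_sql : Prop := (∀ (sql : String), Dom_normalize_sql sql → Raises_normalize_sql sql → ¬ Pre_normalize_sql sql) ∧ (Dom_normalize_sql (pvRaiseWitness_normalize_sql) ∧ Raises_normalize_sql (pvRaiseWitness_normalize_sql) ∧ normalize_sql_alt (pvRaiseWitness_normalize_sql) = pvRaiseWitnessOut_normalize_sql)

-- ===== LEMMAS AND PROOFS =====

-- A's for loop as a structural recursion on (remaining input, current_quote)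
def pvLoopA : List Char → Option Char → List Char
  | [], _ => []
  | c :: cs, none =>
      PySem.Chars.lowerChar c :: pvLoopA cs (if c ∈ ['"', '\'', '`'] then some c else none)
  | c :: cs, some q => c :: pvLoopA cs (if c = q then none else some q)

theorem pvFoldl_eq (l : List Char) (acc : List Char) (st : Option Char) :
    (l.foldl
      (fun (st : List Char × Option Char) c =>
        match st.2 with
        | none =>
          (st.1 ++ [PySem.Chars.lowerChar c],
           if c ∈ ['"', '\'', '`'] then some c else none)
        | some q => (st.1 ++ [c], if c = q then none else some q))
      (acc, st)).1 = acc ++ pvLoopA l st := by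
  induction l generalizing acc st with
  | nil => simp [pvLoopA]
  | cons c cs ih =>
    cases st with
    | none =>
      rw [List.foldl_cons]
      exact (ih (acc ++ [PySem.Chars.lowerChar c])
        (if c ∈ ['"', '\'', '`'] then some c else none)).trans (by simp [pvLoopA])
    | some q =>
      rw [List.foldl_cons]
      exact (ih (acc ++ [c]) (if c = q then none else some q)).trans (by simp [pvLoopA])

theorem pvLoopA_none_skip (pre t : List Char) (h : ∀ c ∈ pre, c ∉ ['"', '\'', '`']) :
    pvLoopA (pre ++ t) none = pre.map PySem.Chars.lowerChar ++ pvLoopA t none := by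
  induction pre with
  | nil => simp
  | cons c cs ih =>
    have hc := h c (by simp)
    simp [pvLoopA, hc, ih fun x hx => h x (by simp [hx])]

theorem pvLoopA_some_skip (mid t : List Char) (q : Char) (h : ∀ c ∈ mid, c ≠ q) :
    pvLoopA (mid ++ t) (some q) = mid ++ pvLoopA t (some q) := by
  induction mid with
  | nil => simp
  | cons c cs ih =>
    have hc := h c (by simp)
    simp [pvLoopA, hc, ih fun x hx => h x (by simp [hx])]

theorem pvLc_quote {c : Char} (h : pvIsQuote c = true) : PySem.Chars.lowerChar c = c := by
  simp [pvIsQuote] at h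
  rcases h with (h | h) | h <;> subst h <;> decide

theorem pvMem_quotes {c : Char} : c ∈ ['"', '\'', '`'] ↔ pvIsQuote c = true := by
  simp [pvIsQuote, or_assoc]

theorem pvLoopA_some_all (l : List Char) (q : Char) (h : ∀ x ∈ l, x ≠ q) :
    pvLoopA l (some q) = l := by
  have := pvLoopA_some_skip l [] q h
  simpa [pvLoopA] using this

theorem pvLoopA_eq_segLower (l : List Char) : pvLoopA l none = pvSegLower l := by
  induction l using pvSegLower.induct with
  | case1 => simp [pvLoopA, pvSegLower]
  | case2 c cs hq hr =>
    have hmem : c ∈ ['"', '\'', '`'] := pvMem_quotes.mpr hq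
    have hmid : ∀ x ∈ cs.takeWhile (fun x => x != c), x ≠ c := by
      intro x hx
      simpa using List.mem_takeWhile_imp hx
    have hcs : cs.takeWhile (fun x => x != c) = cs := by
      have := List.takeWhile_append_dropWhile (p := fun x => x != c) (l := cs)
      rw [hr] at this
      simpa using this
    have hall : ∀ x ∈ cs, x ≠ c := by rw [hcs] at hmid; exact hmid
    rw [pvLoopA, if_pos hmem, pvLc_quote hq, pvLoopA_some_all _ _ hall]
    simp [pvSegLower, hq, hr, hcs]
  | case3 c cs hq hr ih =>
    have hmem : c ∈ ['"', '\'', '`'] := pvMem_quotes.mpr hq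
    have hmid : ∀ x ∈ cs.takeWhile (fun x => x != c), x ≠ c := by
      intro x hx
      simpa using List.mem_takeWhile_imp hx
    obtain ⟨d, rest, hdr⟩ : ∃ d rest, cs.dropWhile (fun x => x != c) = d :: rest := by
      rcases h' : cs.dropWhile (fun x => x != c) with _ | ⟨d, rest⟩
      · exact absurd h' hr
      · exact ⟨d, rest, rfl⟩
    have hd : d = c := by
      have hhead := List.head_dropWhile_not (fun x => x != c) (l := cs) hr
      simp only [hdr, List.head_cons] at hhead
      simpa using hhead
    have hsplit : cs.takeWhile (fun x => x != c) ++ d :: rest = cs := by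
      have := List.takeWhile_append_dropWhile (p := fun x => x != c) (l := cs)
      rw [hdr] at this
      exact this
    have htail : (cs.dropWhile (fun x => x != c)).tail = rest := by rw [hdr]; rfl
    rw [htail] at ih
    have key : pvLoopA cs (some c)
        = cs.takeWhile (fun x => x != c) ++ c :: pvLoopA rest none := by
      conv_lhs => rw [← hsplit]
      rw [pvLoopA_some_skip _ _ _ hmid, hd]
      simp [pvLoopA]
    rw [pvLoopA, if_pos hmem, pvLc_quote hq, key, ih]
    simp [pvSegLower, hq, hr, htail]
  | case4 c cs hq ih =>
    have hnmem : c ∉ ['"', '\'', '`'] := fun hm => by simp [pvMem_quotes.mp hm] at hq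
    have hpre : ∀ x ∈ cs.takeWhile (fun x => !pvIsQuote x), x ∉ ['"', '\'', '`'] := by
      intro x hx hm
      have := List.mem_takeWhile_imp hx
      simp [pvMem_quotes.mp hm] at this
    have key : pvLoopA cs none
        = (cs.takeWhile (fun x => !pvIsQuote x)).map PySem.Chars.lowerChar
            ++ pvLoopA (cs.dropWhile (fun x => !pvIsQuote x)) none := by
      conv_lhs => rw [← List.takeWhile_append_dropWhile (p := fun x => !pvIsQuote x) (l := cs)]
      rw [pvLoopA_none_skip _ _ hpre]
    rw [pvLoopA, if_neg hnmem, key, ih]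
    simp [pvSegLower, hq]

theorem pvLowerA_eq (s : String) :
    pvLowerA s = String.ofList (pvSegLower (PySem.Str.replace s "``" "`").toList) := by
  simp only [pvLowerA]
  rw [pvFoldl_eq, pvLoopA_eq_segLower]
  simp

theorem pvCond_eq (sql : String) (h : sql ≠ "") :
    (PySem.Str.pyGet? sql (-1) = some ';') ↔ (PySem.Str.endswith sql ";" = true) := by
  have hl : sql.toList ≠ [] := by
    intro hn; apply h; cases sql; simp_all
  rcases List.eq_nil_or_concat sql.toList with h0 | ⟨xs, x, hx⟩
  · exact absurd h0 hl
  · rw [List.concat_eq_append] at hx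
    have h1 : PySem.Str.pyGet? sql (-1) = some x := by
      rw [show PySem.Str.pyGet? sql (-1) = PySem.Chars.pyGet? sql.toList (-1) from by
            simp [PySem.Str.pyGet?], hx]
      simp [PySem.Chars.pyGet?, PySem.List.pyGet?, PySem.List.pyIdx?]
    have h2 : PySem.Str.endswith sql ";" = PySem.Chars.endswith sql.toList [';'] := by
      simp [PySem.Str.endswith]
    rw [h1, h2, PySem.Chars.endswith_iff, hx]
    constructor
    · intro hg
      have hx' : x = ';' := by simpa using hg
      subst hx'
      exact ⟨xs, rfl⟩
    · intro he
      rcases List.suffix_concat_iff.mp he with h1 | ⟨t, ht, _⟩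
      · simp at h1
      · have hx' : x = ';' := by
          cases t with
          | nil => simpa using ht.symm
          | cons a t' => simp at ht
        subst hx'
        rfl

-- ===== VERDICT (by name: the statement is the Claim_ definition above) =====
theorem normalize_sql_spec : Claim_equal_normalize_sql := by
  intro sql _ hpre
  unfold Spec_normalize_sql
  simp only [normalize_sql, normalize_sql_alt]
  rw [pvLowerA_eq]
  have hcond : (PySem.Str.pyGet? sql (-1) = some ';') ↔ (PySem.Str.endswith sql ";" = true) :=
    pvCond_eq sql hpre
  by_cases hc : PySem.Str.pyGet? sql (-1) = some ';'
  · rw [if_pos hc, if_pos (hcond.mp hc)]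
    simp only [List.map_cons, List.map_nil, List.cons_append, List.nil_append,
      List.foldl_cons, List.foldl_nil]
  · rw [if_neg hc, if_neg (fun hb => hc (hcond.mpr hb))]
    simp only [List.map_cons, List.map_nil, List.cons_append, List.nil_append,
      List.foldl_cons, List.foldl_nil]

def normalize_sql_raises : Claim_raises_normalize_sql := by
  unfold Claim_raises_normalize_sql
  refine ⟨fun sql _ hr hp => hp hr, by decide, rfl, ?_⟩
  show normalize_sql_alt "" = ""
  simp only [normalize_sql_alt]
  rw [show (if PySem.Str.endswith ("" : String) ";" then PySem.Str.slice "" none (some (-1))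
        else ("" : String)) = "" from by decide]
  rw [show PySem.Str.replace "" "``" "`" = "" from by decide]
  rw [show ("" : String).toList = ([] : List Char) from rfl]
  rw [show pvSegLower [] = [] from by simp [pvSegLower]]
  rw [show PySem.Str.join " " (PySem.Str.split₀ (PySem.Str.strip (String.ofList []))) = ""
      from by decide]
  simp only [List.map_cons, List.map_nil, List.cons_append, List.nil_append,
    List.foldl_cons, List.foldl_nil]
  decide
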